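-- pv_equiv track=rewrite | github.com/smintzo/aoc23 | day7.py | j_switch
-- ===== SOURCE A (Python) =====
-- def j_switch(s):
--     ans = []
--     if len(s) == 1:
--         if s == 'J':
--             ans = ['A', 'K', 'Q', 'T', '9', '8', '7', '6', '5', '4', '3', '2']
--         else:
--             ans = [s]
--     else:
--         for x in j_switch(s[:-1]):
--             for y in j_switch(s[-1]):
--                 ans.append(x + y)
--     return ans
-- ===== SOURCE B (Python) =====
-- CARDS = ['A', 'K', 'Q', 'T', '9', '8', '7', '6', '5', '4', '3', '2']
--
-- def j_switch(s):
--     result = ['']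
--     for c in s:
--         opts = CARDS if c == 'J' else [c]
--         result = [r + o for r in result for o in opts]
--     return result
-- ===== Notes on version B (the rewrite author's own statement) =====
-- stated objective: faster
-- what changed: Replaced A's double recursion (recurse on s[:-1] and re-call j_switch(s[-1]) inside the inner loop) by a single left-to-right fold that maps each character to its option list and accumulates the Cartesian product in the same order; no recursion and no re-derivation of the per-character option lists.
import Mathlib
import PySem

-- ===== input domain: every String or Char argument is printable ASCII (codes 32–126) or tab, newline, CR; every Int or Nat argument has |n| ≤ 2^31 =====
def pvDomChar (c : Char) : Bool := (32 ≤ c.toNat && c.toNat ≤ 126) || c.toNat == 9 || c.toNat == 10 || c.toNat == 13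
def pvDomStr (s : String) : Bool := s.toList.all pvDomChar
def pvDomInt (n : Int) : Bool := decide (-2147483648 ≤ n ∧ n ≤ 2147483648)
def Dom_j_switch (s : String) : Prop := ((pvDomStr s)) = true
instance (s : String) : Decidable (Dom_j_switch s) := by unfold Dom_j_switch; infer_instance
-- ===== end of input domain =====

-- B replaces A's double recursion by a single left-to-right fold that builds the
-- Cartesian product of per-character option lists (simpler decomposition, same order).

-- ===== PORT A =====
def cardsA : List String := ["A", "K", "Q", "T", "9", "8", "7", "6", "5", "4", "3", "2"]

-- literal port of A's recursion over the characters of s; the 'l = []' guard only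
-- totalizes the function (Python recurses forever on the empty string, excluded by Pre_)
def jA (l : List Char) : List String :=
  if l.length = 1 then
    if l = ['J'] then cardsA else [String.mk l]
  else if h0 : l = [] then []
  else
    (jA l.dropLast).foldl (fun ans x =>
      (jA [l.getLast h0]).foldl (fun a y => a ++ [x ++ y]) ans) []
  termination_by l.length
  decreasing_by
  · have := List.length_pos_iff.mpr h0
    simp; omega
  · have := List.length_pos_iff.mpr h0
    simp; omega

def j_switch (s : String) : List String := jA s.toList

-- ===== PORT B =====
def cardsB : List String := ["A", "K", "Q", "T", "9", "8", "7", "6", "5", "4", "3", "2"]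

def j_switch_alt (s : String) : List String :=
  s.toList.foldl (fun result c =>
    result.flatMap (fun r =>
      (if c = 'J' then cardsB else [String.mk [c]]).map (fun o => r ++ o))) [""]

-- ===== PRECONDITION & SPEC =====
-- Pre_ excludes only the empty string, on which A recurses forever (RecursionError).
def Pre_j_switch (s : String) : Prop := s ≠ ""
instance (s : String) : Decidable (Pre_j_switch s) := by unfold Pre_j_switch; infer_instance
def pvWitness_j_switch : String := "J2"

def Spec_j_switch (s : String) (out : List String) : Prop := out = j_switch_alt s
instance (s : String) (out : List String) : Decidable (Spec_j_switch s out) := by unfold Spec_j_switch; infer_instance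

-- ===== CLAIM (what is proved, stated in full; the proofs are below) =====
def Claim_equal_j_switch : Prop := ∀ (s : String), Dom_j_switch s → Pre_j_switch s → Spec_j_switch s (j_switch s)

-- ===== LEMMAS AND PROOFS =====
def stepB (result : List String) (c : Char) : List String :=
  result.flatMap (fun r =>
    (if c = 'J' then cardsB else [String.mk [c]]).map (fun o => r ++ o))

lemma jA_single (c : Char) :
    jA [c] = if c = 'J' then cardsB else [String.mk [c]] := by
  rw [jA]
  by_cases h : c = 'J' <;> simp [h, cardsA, cardsB]

lemma jA_eq_foldl (l : List Char) (h : l ≠ []) :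
    jA l = l.foldl stepB [""] := by
  induction l using List.reverseRecOn with
  | nil => exact absurd rfl h
  | append_singleton l c ih =>
    cases l with
    | nil =>
      simp only [List.nil_append]
      rw [jA_single]
      simp [stepB]
    | cons a t =>
      rw [jA]
      have hne : (a :: t) ≠ ([] : List Char) := by simp
      have hlen : ((a :: t) ++ [c]).length ≠ 1 := by simp
      simp only [hlen, if_false, List.dropLast_concat, List.getLast_concat,
        reduceDIte, List.append_eq_nil_iff, List.cons_ne_nil, false_and]
      simp only [jA_single, PySem.List.foldl_append_singleton_eq_map]
      rw [PySem.List.foldl_append_eq_flatMap, ih hne, List.foldl_append]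
      simp [stepB]

-- ===== VERDICT (by name: the statement is the Claim_ definition above) =====
theorem j_switch_spec : Claim_equal_j_switch := by
  intro s _ hpre
  unfold Spec_j_switch j_switch j_switch_alt
  have h : s.toList ≠ [] := by
    intro h0
    exact hpre (String.toList_eq_nil_iff.mp h0)
  exact jA_eq_foldl s.toList h
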